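-- pv_equiv track=rewrite | github.com/Aria-al/AOC_2024 | Day09/Day09Partie1.py | libereEspaceDisque
-- ===== SOURCE A (Python) =====
-- def libereEspaceDisque (fichier : list[str]) -> str :
--     premierEspaceVide : int = 0
--     dernierEmplacementFichier : int = len(fichier) - 1
--
--     while premierEspaceVide <= dernierEmplacementFichier :
--
--         if fichier[premierEspaceVide] == "." and fichier[dernierEmplacementFichier] != "." :
--             fichier[premierEspaceVide] = fichier[dernierEmplacementFichier]
--             fichier[dernierEmplacementFichier] = "."
--
--         else :
--             if fichier[premierEspaceVide] != "." :
--                 premierEspaceVide += 1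
--
--             if fichier[dernierEmplacementFichier] == "." :
--                 dernierEmplacementFichier -= 1
--
--     return fichier
-- ===== SOURCE B (Python) =====
-- def libereEspaceDisque(fichier: list[str]) -> str:
--     # One forward pass: count file cells T, collect files beyond position T
--     # (rightmost first), then rebuild: keep files in place in 0..T-1, fill the
--     # gaps from that tail, pad with dots. Mutates fichier in place and returns it.
--     n = len(fichier)
--     T = sum(1 for c in fichier if c != ".")
--     tail = [fichier[j] for j in range(n - 1, T - 1, -1) if fichier[j] != "."]
--     k = 0
--     res = []
--     for i in range(T):
--         if fichier[i] != ".":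
--             res.append(fichier[i])
--         else:
--             res.append(tail[k])
--             k += 1
--     res.extend(["."] * (n - T))
--     fichier[:] = res
--     return fichier
-- ===== Notes on version B (the rewrite author's own statement) =====
-- stated objective: alternative
-- what changed: A compacts by repeatedly swapping the rightmost file into the leftmost gap with two converging pointers; B counts the file cells T in one pass, collects the files lying beyond position T (rightmost first), and rebuilds the array in a single forward pass (keep files in place, fill gaps from that tail, pad with dots), writing the result back in place.
import Mathlib
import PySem

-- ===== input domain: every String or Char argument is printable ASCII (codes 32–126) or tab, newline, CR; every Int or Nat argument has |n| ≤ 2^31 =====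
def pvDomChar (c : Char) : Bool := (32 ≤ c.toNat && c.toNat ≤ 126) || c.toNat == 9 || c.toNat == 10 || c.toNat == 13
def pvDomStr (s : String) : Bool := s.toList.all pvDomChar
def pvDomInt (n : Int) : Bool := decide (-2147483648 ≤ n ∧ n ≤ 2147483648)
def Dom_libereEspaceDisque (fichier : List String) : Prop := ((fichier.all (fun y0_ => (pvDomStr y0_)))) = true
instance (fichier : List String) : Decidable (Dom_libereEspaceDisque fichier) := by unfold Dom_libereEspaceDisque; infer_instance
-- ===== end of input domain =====

-- B replaces A's two-pointer in-place swapping loop by one counting/collecting pass plus a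
-- rebuild (objective: alternative decomposition). Both Pythons mutate `fichier` in place the
-- same way and return it; the equivalence proved here is about the returned value.

-- ===== PORT A =====
-- A's while-loop with the two indices; the range guard `0 ≤ i ∧ j < len` only makes the
-- in-range indexing total (every reachable state satisfies it).
def loopA (f : List String) (i j : Int) : List String :=
  if h : i ≤ j ∧ 0 ≤ i ∧ j < (f.length : Int) then
    if hc : PySem.List.pyGetD f i "" = "." ∧ PySem.List.pyGetD f j "" ≠ "." then
      loopA (PySem.List.pySetD (PySem.List.pySetD f i (PySem.List.pyGetD f j "")) j ".") i j
    else
      loopA f (if PySem.List.pyGetD f i "" ≠ "." then i + 1 else i)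
              (if PySem.List.pyGetD f j "" = "." then j - 1 else j)
  else f
termination_by (2 * (j - i + 1).toNat + (if PySem.List.pyGetD f i "" = "." then 1 else 0))
decreasing_by
  · obtain ⟨hij, hi0, hjl⟩ := h
    obtain ⟨hP, hQ⟩ := hc
    have hilen : i < (f.length : Int) := lt_of_le_of_lt hij hjl
    have hj0 : (0:Int) ≤ j := le_trans hi0 hij
    have h2 : PySem.List.pyGetD (PySem.List.pySetD (PySem.List.pySetD f i (PySem.List.pyGetD f j "")) j ".") i "" = PySem.List.pyGetD f j "" := by
      rw [PySem.List.pySetD_of_nonneg _ _ hi0, PySem.List.pySetD_of_nonneg _ _ hj0]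
      rw [PySem.List.pyGetD_eq_getElem _ _ hi0 (by simpa using hilen)]
      rw [List.getElem_set_ne (by
        intro e
        apply hQ
        rw [PySem.List.pyGetD_eq_getElem _ _ hi0 (by simpa using hilen)] at hP
        rw [PySem.List.pyGetD_eq_getElem _ _ hj0 (by simpa using hjl)]
        simp only [e]
        exact hP)]
      exact List.getElem_set_self _
    simp only [h2, if_neg hQ, if_pos hP]
    omega
  · obtain ⟨hij, -, -⟩ := h
    simp only [not_and_or, not_not] at hc
    split_ifs <;> first | omega | tauto

def libereEspaceDisque (fichier : List String) : List String :=
  loopA fichier 0 ((fichier.length : Int) - 1)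

-- ===== PORT B =====
-- loop body of B's single forward pass: state = (res, k)
def bStep (fichier tail : List String) (st : List String × Int) (i : Int) : List String × Int :=
  if PySem.List.pyGetD fichier i "" ≠ "." then (st.1 ++ [PySem.List.pyGetD fichier i ""], st.2)
  else (st.1 ++ [PySem.List.pyGetD tail st.2 ""], st.2 + 1)

def libereEspaceDisque_alt (fichier : List String) : List String :=
  let n : Int := fichier.length
  let T : Int := (fichier.countP (fun c => c != ".") : Int)
  let tail := ((PySem.List.pyRange (n - 1) (T - 1) (-1)).map
                (fun j => PySem.List.pyGetD fichier j "")).filter (fun x => x != ".")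
  let res := ((PySem.List.pyRange 0 T 1).foldl (bStep fichier tail) ([], 0)).1
  res ++ List.replicate (n - T).toNat "."

-- ===== PRECONDITION & SPEC =====
def Spec_libereEspaceDisque (fichier : List String) (out : List String) : Prop := out = libereEspaceDisque_alt fichier
instance (fichier : List String) (out : List String) : Decidable (Spec_libereEspaceDisque fichier out) := by unfold Spec_libereEspaceDisque; infer_instance

-- ===== CLAIM (what is proved, stated in full; the proofs are below) =====
def Claim_equal_libereEspaceDisque : Prop := ∀ (fichier : List String), Dom_libereEspaceDisque fichier → Spec_libereEspaceDisque fichier (libereEspaceDisque fichier)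

-- ===== LEMMAS AND PROOFS =====

-- functional form of B's forward pass: keep files, fill gaps from ts
def pvMerge : List String → List String → List String
  | [], _ => []
  | x :: xs, ts => if x != "." then x :: pvMerge xs ts else ts.headD "" :: pvMerge xs ts.tail

-- closed functional description both ports are reduced to
def pvSpec (f : List String) : List String :=
  let T := f.countP (fun c => c != ".")
  pvMerge (f.take T) (((f.drop T).filter (fun c => c != ".")).reverse)
    ++ List.replicate (f.length - T) "."

theorem pvMerge_append_nondot (a xs ts : List String) (ha : ∀ x ∈ a, x ≠ ".") :
    pvMerge (a ++ xs) ts = a ++ pvMerge xs ts := by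
  induction a with
  | nil => rfl
  | cons y a ih =>
    have hy : (y != ".") = true := by simpa using ha y (by simp)
    simp only [List.cons_append, pvMerge, hy, if_pos]
    rw [ih fun x hx => ha x (by simp [hx])]

theorem pvMerge_all_nondot (a : List String) (ts : List String) (ha : ∀ x ∈ a, x ≠ ".") :
    pvMerge a ts = a := by
  have := pvMerge_append_nondot a [] ts ha
  simpa [pvMerge] using this

-- element-level view of bStep
def gStep (tail : List String) (st : List String × Int) (x : String) : List String × Int :=
  if x ≠ "." then (st.1 ++ [x], st.2) else (st.1 ++ [PySem.List.pyGetD tail st.2 ""], st.2 + 1)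

theorem bStep_eq_gStep (fichier tail : List String) (st : List String × Int) (i : Int) :
    bStep fichier tail st i = gStep tail st (PySem.List.pyGetD fichier i "") := rfl

-- B's index fold over range(T) is the element fold over the first T cells
theorem foldl_bStep_take (fichier tail : List String) :
    ∀ (T : Nat), T ≤ fichier.length → ∀ (init : List String × Int),
    (PySem.List.pyRange 0 (T : Int) 1).foldl (bStep fichier tail) init
      = (fichier.take T).foldl (gStep tail) init := by
  intro T
  induction T with
  | zero => intro _ init; simp [PySem.List.pyRange_one_eq_nil]
  | succ T ih =>
    intro hT init
    have hc : ((T + 1 : Nat) : Int) = (T : Int) + 1 := by push_cast; ring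
    rw [hc, PySem.List.pyRange_one_succ_right (a := 0) (b := (T : Int)) (Int.natCast_nonneg T),
      List.foldl_append, ih (by omega) init, List.take_add_one, List.foldl_append]
    have hget : fichier[T]? = some fichier[T] := List.getElem?_eq_getElem (by omega)
    rw [hget]
    simp only [Option.toList_some, List.foldl_cons, List.foldl_nil]
    rw [bStep_eq_gStep]
    congr 1
    rw [PySem.List.pyGetD_natCast, List.getD_eq_getElem?_getD, hget]
    rfl

-- B's fold equals pvMerge
theorem fold_eq_merge (tail : List String) :
    ∀ (xs : List String) (acc : List String) (k : Nat),
      (xs.foldl (gStep tail) (acc, (k : Int))).1 = acc ++ pvMerge xs (tail.drop k) := by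
  intro xs
  induction xs with
  | nil => intro acc k; simp [pvMerge]
  | cons x xs ih =>
    intro acc k
    by_cases hx : x = "."
    · subst hx
      have h1 : PySem.List.pyGetD tail (k : Int) "" = (tail.drop k).headD "" := by
        rw [PySem.List.pyGetD_natCast, List.getD_eq_getElem?_getD,
          List.headD_eq_head?_getD, List.head?_drop]
      have h2 : ((k : Int) + 1) = ((k + 1 : Nat) : Int) := by push_cast; ring
      simp only [List.foldl_cons, gStep, if_neg (by simp : ¬("." ≠ "."))]
      rw [h1, h2, ih (acc ++ [(tail.drop k).headD ""]) (k + 1)]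
      simp [pvMerge, List.tail_drop]
    · simp only [List.foldl_cons, gStep, if_pos hx]
      rw [ih (acc ++ [x]) k]
      simp [pvMerge, hx]

theorem countP_nondot (a : List String) (ha : ∀ x ∈ a, x ≠ ".") :
    a.countP (fun c => c != ".") = a.length :=
  List.countP_eq_length.mpr (fun x hx => by simpa using ha x hx)

theorem countP_dots (c : List String) (hc : ∀ x ∈ c, x = ".") :
    c.countP (fun c => c != ".") = 0 :=
  List.countP_eq_zero.mpr (fun x hx => by simp [hc x hx])

theorem alt_eq_pvSpec (f : List String) : libereEspaceDisque_alt f = pvSpec f := by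
  simp only [libereEspaceDisque_alt, pvSpec]
  have hT : (f.countP (fun c => c != ".")) ≤ f.length := List.countP_le_length
  have htail : ((PySem.List.pyRange ((f.length : Int) - 1) ((f.countP (fun c => c != ".") : Int) - 1) (-1)).map
      (fun j => PySem.List.pyGetD f j "")).filter (fun x => x != ".")
      = ((f.drop (f.countP (fun c => c != "."))).filter (fun c => c != ".")).reverse := by
    rw [PySem.List.pyRange_neg_one_eq_reverse]
    rw [show (f.countP (fun c => c != ".") : Int) - 1 + 1 = (f.countP (fun c => c != ".") : Int) by ring]
    rw [show (f.length : Int) - 1 + 1 = (f.length : Int) by ring]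
    rw [List.map_reverse, List.filter_reverse]
    rw [PySem.List.map_pyGetD_pyRange' f "" (Int.natCast_nonneg _)]
    rw [Int.toNat_natCast]
  rw [htail]
  rw [foldl_bStep_take f _ (f.countP (fun c => c != ".")) hT]
  rw [show ((0:Int)) = ((0 : Nat) : Int) from rfl]
  rw [fold_eq_merge _ _ [] 0]
  rw [List.drop_zero, List.nil_append]
  congr 1
  congr 1
  omega

-- pvSpec is invariant under A's swap step
theorem pvSpec_swap (a mid c : List String) (l : String)
    (ha : ∀ x ∈ a, x ≠ ".") (hc : ∀ x ∈ c, x = ".") (hl : l ≠ ".") :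
    pvSpec (a ++ "." :: mid ++ l :: c) = pvSpec (a ++ l :: mid ++ "." :: c) := by
  have hpl : (l != ".") = true := by simpa using hl
  have hfc : c.filter (fun s => s != ".") = [] :=
    List.filter_eq_nil_iff.mpr (fun x hx => by simp [hc x hx])
  simp only [pvSpec, List.cons_append, List.append_assoc]
  set t := mid.countP (fun c => c != ".") with htdef
  have ht : t ≤ mid.length := List.countP_le_length
  have hT1 : (a ++ "." :: (mid ++ l :: c)).countP (fun c => c != ".") = a.length + t + 1 := by
    simp [List.countP_append, countP_nondot a ha, countP_dots c hc, hpl, ← htdef]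
    omega
  have hT2 : (a ++ l :: (mid ++ "." :: c)).countP (fun c => c != ".") = a.length + t + 1 := by
    simp [List.countP_append, countP_nondot a ha, countP_dots c hc, hpl, ← htdef]
    omega
  rw [hT1, hT2]
  have htake1 : (a ++ "." :: (mid ++ l :: c)).take (a.length + t + 1) = a ++ "." :: mid.take t := by
    rw [List.take_append, List.take_of_length_le (by omega),
      show a.length + t + 1 - a.length = t + 1 by omega, List.take_succ_cons,
      List.take_append_of_le_length ht]
  have htake2 : (a ++ l :: (mid ++ "." :: c)).take (a.length + t + 1) = a ++ l :: mid.take t := by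
    rw [List.take_append, List.take_of_length_le (by omega),
      show a.length + t + 1 - a.length = t + 1 by omega, List.take_succ_cons,
      List.take_append_of_le_length ht]
  have hdrop1 : (a ++ "." :: (mid ++ l :: c)).drop (a.length + t + 1) = mid.drop t ++ l :: c := by
    rw [List.drop_append, List.drop_of_length_le (by omega),
      show a.length + t + 1 - a.length = t + 1 by omega, List.drop_succ_cons,
      List.drop_append_of_le_length ht, List.nil_append]
  have hdrop2 : (a ++ l :: (mid ++ "." :: c)).drop (a.length + t + 1) = mid.drop t ++ "." :: c := by
    rw [List.drop_append, List.drop_of_length_le (by omega),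
      show a.length + t + 1 - a.length = t + 1 by omega, List.drop_succ_cons,
      List.drop_append_of_le_length ht, List.nil_append]
  rw [htake1, htake2, hdrop1, hdrop2]
  have hf1 : ((mid.drop t ++ l :: c).filter (fun s => s != ".")).reverse
      = l :: ((mid.drop t).filter (fun s => s != ".")).reverse := by
    simp [List.filter_append, hpl, hfc]
  have hf2 : ((mid.drop t ++ "." :: c).filter (fun s => s != ".")).reverse
      = ((mid.drop t).filter (fun s => s != ".")).reverse := by
    simp [List.filter_append, hfc]
  rw [hf1, hf2]
  rw [pvMerge_append_nondot a _ _ ha, pvMerge_append_nondot a _ _ ha]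
  have hm1 : pvMerge ("." :: mid.take t) (l :: ((mid.drop t).filter (fun s => s != ".")).reverse)
      = l :: pvMerge (mid.take t) ((mid.drop t).filter (fun s => s != ".")).reverse := by
    simp [pvMerge]
  have hm2 : pvMerge (l :: mid.take t) ((mid.drop t).filter (fun s => s != ".")).reverse
      = l :: pvMerge (mid.take t) ((mid.drop t).filter (fun s => s != ".")).reverse := by
    simp [pvMerge, hpl]
  rw [hm1, hm2]
  simp [List.length_append]

-- a compacted array is a fixed point of pvSpec
theorem pvSpec_done (a c : List String) (ha : ∀ x ∈ a, x ≠ ".") (hc : ∀ x ∈ c, x = ".") :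
    pvSpec (a ++ c) = a ++ c := by
  have hT : (a ++ c).countP (fun c => c != ".") = a.length := by
    rw [List.countP_append, countP_nondot a ha, countP_dots c hc]; omega
  simp only [pvSpec]
  rw [hT, List.take_left, List.drop_left]
  rw [List.filter_eq_nil_iff.mpr (fun x hx => by simp [hc x hx])]
  rw [List.reverse_nil, pvMerge_all_nondot a [] ha]
  have hrep : List.replicate ((a ++ c).length - a.length) ("." : String) = c := by
    rw [List.length_append, show a.length + c.length - a.length = c.length by omega]
    exact (List.eq_replicate_of_mem hc).symm
  rw [hrep]

theorem pyGetD_append_mid (u v : List String) :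
    PySem.List.pyGetD (u ++ v) (u.length : Int) "" = v.headD "" := by
  rw [PySem.List.pyGetD_natCast, List.getD_eq_getElem?_getD,
    List.getElem?_append_right (le_refl _), Nat.sub_self, List.headD_eq_head?_getD]
  cases v <;> rfl

theorem set_append_mid (u v : List String) (x : String) :
    (u ++ v).set u.length x = u ++ v.set 0 x := by
  rw [List.set_append]
  simp

-- main loop invariant: on a state  a ++ m ++ c  with clean prefix a and dot suffix c,
-- the loop computes pvSpec of the whole array
theorem loopA_decomp : ∀ (n : Nat) (a m c : List String),
    2 * m.length + (if m.head? = some "." then 1 else 0) ≤ n →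
    (∀ x ∈ a, x ≠ ".") → (∀ x ∈ c, x = ".") →
    loopA (a ++ m ++ c) (a.length : Int) ((a.length : Int) + (m.length : Int) - 1)
      = pvSpec (a ++ m ++ c) := by
  intro n
  induction n with
  | zero =>
    intro a m c hmu ha hc
    have hm : m = [] := by cases m with | nil => rfl | cons h m' => simp at hmu
    subst hm
    rw [loopA, dif_neg (by rintro ⟨h1, -⟩; simp at h1)]
    simpa using (pvSpec_done a c ha hc).symm
  | succ n ih =>
    -- a restatement of the induction hypothesis that unifies against any index form
    have IH : ∀ (a' m' c' : List String) (i j : Int) (ff : List String),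
        2 * m'.length + (if m'.head? = some "." then 1 else 0) ≤ n →
        (∀ x ∈ a', x ≠ ".") → (∀ x ∈ c', x = ".") →
        i = (a'.length : Int) → j = (a'.length : Int) + (m'.length : Int) - 1 →
        ff = a' ++ m' ++ c' →
        loopA ff i j = pvSpec ff := by
      intro a' m' c' i j ff h1 h2 h3 h4 h5 h6
      subst h4; subst h5; subst h6
      exact ih a' m' c' h1 h2 h3
    intro a m c hmu ha hc
    cases m with
    | nil => exact IH a [] c _ _ _ (by simp) ha hc (by simp) (by simp) (by simp)
    | cons h m' =>
      rcases List.eq_nil_or_concat m' with rfl | ⟨mid, l, rfl⟩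
      · -- m = [h] : the two pointers meet on one cell
        have hj : (a.length : Int) + (([h] : List String).length : Int) - 1 = (a.length : Int) := by
          simp
        rw [hj, loopA, dif_pos (by
          refine ⟨le_refl _, Int.natCast_nonneg _, ?_⟩
          push_cast [List.length_append, List.length_cons]
          omega)]
        have hg : PySem.List.pyGetD (a ++ [h] ++ c) (a.length : Int) "" = h := by
          rw [List.append_assoc, pyGetD_append_mid]
          rfl
        simp only [hg]
        rw [dif_neg (by tauto)]
        by_cases hh : h = "."
        · rw [if_neg (by simp [hh]), if_pos hh]
          subst hh
          exact IH a [] ("." :: c) _ _ _ (by simp) ha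
            (fun x hx => by rcases List.mem_cons.mp hx with rfl | hx
                            exacts [rfl, hc x hx])
            (by simp) (by simp) (by simp)
        · rw [if_pos hh, if_neg hh]
          exact IH (a ++ [h]) [] c _ _ _ (by simp)
            (fun x hx => by rcases List.mem_append.mp hx with hx | hx
                            exacts [ha x hx, by simp at hx; subst hx; exact hh])
            hc (by simp)
            (by simp only [List.length_append, List.length_cons, List.length_nil]; push_cast; omega)
            (by simp)
      · -- m = h :: mid ++ [l] : distinct front and back cells
        simp only [List.concat_eq_append] at hmu ⊢
        have hguard : ((a.length : Int) ≤ (a.length : Int) + (((h :: (mid ++ [l])) : List String).length : Int) - 1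
            ∧ (0:Int) ≤ (a.length : Int)
            ∧ (a.length : Int) + (((h :: (mid ++ [l])) : List String).length : Int) - 1 < ((a ++ (h :: (mid ++ [l])) ++ c).length : Int)) := by
          refine ⟨?_, Int.natCast_nonneg _, ?_⟩ <;>
            push_cast [List.length_append, List.length_cons, List.length_nil] <;> omega
        have hgi : PySem.List.pyGetD (a ++ (h :: (mid ++ [l])) ++ c) (a.length : Int) "" = h := by
          rw [show a ++ (h :: (mid ++ [l])) ++ c = a ++ (h :: (mid ++ l :: c)) by simp,
            pyGetD_append_mid]
          rfl
        have hjeq : (a.length : Int) + (((h :: (mid ++ [l])) : List String).length : Int) - 1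
            = (((a ++ h :: mid) : List String).length : Int) := by
          push_cast [List.length_append, List.length_cons, List.length_nil]
          ring
        have hgj : PySem.List.pyGetD (a ++ (h :: (mid ++ [l])) ++ c)
            ((a.length : Int) + (((h :: (mid ++ [l])) : List String).length : Int) - 1) "" = l := by
          rw [hjeq, show a ++ (h :: (mid ++ [l])) ++ c = (a ++ h :: mid) ++ (l :: c) by simp,
            pyGetD_append_mid]
          rfl
        rw [loopA, dif_pos hguard]
        simp only [hgi, hgj]
        by_cases hswap : h = "." ∧ l ≠ "."
        · rw [dif_pos hswap]
          obtain ⟨hh, hl⟩ := hswap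
          subst hh
          have hset : PySem.List.pySetD
              (PySem.List.pySetD (a ++ ("." :: (mid ++ [l])) ++ c) ((a.length : Int)) l)
              ((a.length : Int) + ((("." :: (mid ++ [l])) : List String).length : Int) - 1) "."
              = (a ++ l :: mid) ++ "." :: c := by
            rw [PySem.List.pySetD_of_nonneg _ _ (Int.natCast_nonneg _), Int.toNat_natCast]
            rw [show a ++ ("." :: (mid ++ [l])) ++ c = a ++ ("." :: (mid ++ l :: c)) by simp,
              set_append_mid, List.set_cons_zero]
            rw [hjeq]
            rw [PySem.List.pySetD_of_nonneg _ _ (Int.natCast_nonneg _), Int.toNat_natCast]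
            rw [show a ++ l :: (mid ++ l :: c) = (a ++ l :: mid) ++ (l :: c) by simp]
            rw [show ((a ++ "." :: mid : List String)).length = ((a ++ l :: mid : List String)).length from by
                simp only [List.length_append, List.length_cons],
              set_append_mid, List.set_cons_zero]
          rw [hset]
          rw [IH a (l :: (mid ++ ["."])) c _ _ _
            (by simp [hl] at hmu ⊢; omega)
            ha hc (by simp)
            (by simp only [List.length_append, List.length_cons, List.length_nil])
            (by simp)]
          have hsw := pvSpec_swap a mid c l ha hc hl
          have e1 : a ++ "." :: mid ++ l :: c = a ++ ("." :: (mid ++ [l])) ++ c := by simp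
          have e2 : a ++ l :: mid ++ "." :: c = (a ++ l :: mid) ++ "." :: c := by simp
          rw [e1, e2] at hsw
          exact hsw.symm
        · rw [dif_neg hswap]
          by_cases hh : h = "." <;> by_cases hl : l = "."
          · -- both ends are dots: only the right pointer moves
            subst hh; subst hl
            rw [if_neg (by simp), if_pos rfl]
            exact IH a ("." :: mid) ("." :: c) _ _ _
              (by simp at hmu ⊢; omega) ha
              (fun x hx => by rcases List.mem_cons.mp hx with rfl | hx
                              exacts [rfl, hc x hx])
              (by simp)
              (by simp only [List.length_append, List.length_cons, List.length_nil]; push_cast; omega)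
              (by simp)
          · exact absurd ⟨hh, hl⟩ hswap
          · -- file at the front, dot at the back: both pointers move
            subst hl
            rw [if_pos hh, if_pos rfl]
            exact IH (a ++ [h]) mid ("." :: c) _ _ _
              (by split_ifs <;> simp at hmu ⊢ <;> omega)
              (fun x hx => by rcases List.mem_append.mp hx with hx | hx
                              exacts [ha x hx, by simp at hx; subst hx; exact hh])
              (fun x hx => by rcases List.mem_cons.mp hx with rfl | hx
                              exacts [rfl, hc x hx])
              (by simp)
              (by simp only [List.length_append, List.length_cons, List.length_nil]; push_cast; omega)
              (by simp)
          · -- files at both ends: only the left pointer moves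
            rw [if_pos hh, if_neg hl]
            exact IH (a ++ [h]) (mid ++ [l]) c _ _ _
              (by split_ifs <;> simp at hmu ⊢ <;> omega)
              (fun x hx => by rcases List.mem_append.mp hx with hx | hx
                              exacts [ha x hx, by simp at hx; subst hx; exact hh])
              hc (by simp)
              (by simp only [List.length_append, List.length_cons, List.length_nil]; push_cast; omega)
              (by simp)

-- ===== VERDICT (by name: the statement is the Claim_ definition above) =====
theorem libereEspaceDisque_spec : Claim_equal_libereEspaceDisque := by
  intro f _
  unfold Spec_libereEspaceDisque libereEspaceDisque
  rw [alt_eq_pvSpec]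
  have := loopA_decomp (2 * f.length + 1) [] f []
    (by split_ifs <;> omega) (by simp) (by simp)
  simpa using this
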